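-- pv_equiv track=rewrite | github.com/Philipg99/My-project-Euler | project euler/101-125/program113.py | bounce
-- ===== SOURCE A (Python) =====
-- def bounce(n):
--     inc=False
--     dec=False
--     f=n%10
--     n//=10
--     while n>0:
--         l=f
--         f=n%10
--         n//=10
--         if f>l:
--             inc=True
--         if f<l:
--             dec=True
--         if inc and dec:
--             return True
--     return inc and dec
-- ===== SOURCE B (Python) =====
-- def bounce(n):
--     if n < 0:
--         return False
--     d = list(str(n))
--     return d != sorted(d) and d != sorted(d, reverse=True)
-- ===== Notes on version B (the rewrite author's own statement) =====
-- stated objective: simpler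
-- what changed: Replaces the digit-peeling mod/floordiv loop with flag state by a guard for negatives plus comparing the digit string against its sorted and reverse-sorted forms (bouncy iff neither monotone).
import Mathlib
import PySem

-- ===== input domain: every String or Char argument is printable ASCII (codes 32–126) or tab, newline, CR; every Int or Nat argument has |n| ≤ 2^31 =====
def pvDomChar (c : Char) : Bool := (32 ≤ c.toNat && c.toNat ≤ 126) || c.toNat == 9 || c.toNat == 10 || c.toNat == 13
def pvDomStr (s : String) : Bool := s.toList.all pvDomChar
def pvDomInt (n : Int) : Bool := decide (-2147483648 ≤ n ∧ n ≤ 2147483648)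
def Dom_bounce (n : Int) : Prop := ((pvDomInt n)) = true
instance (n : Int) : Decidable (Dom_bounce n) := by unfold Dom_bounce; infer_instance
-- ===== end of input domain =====

-- B replaces A's digit-peeling mod/floordiv loop with flag state by a negative guard plus
-- comparing the digit string with its sorted and reverse-sorted forms (objective: simpler).

-- ===== PORT A =====
-- the 'while n>0' loop; state (n, f, inc, dec) exactly as in the Python
def bounceLoop (n f : Int) (inc dec : Bool) : Bool :=
  if _h : n > 0 then
    let l := f
    let f' := PySem.Int.mod n 10
    let n' := PySem.Int.floordiv n 10
    let inc' := if f' > l then true else inc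
    let dec' := if f' < l then true else dec
    if inc' && dec' then true else bounceLoop n' f' inc' dec'
  else inc && dec
termination_by n.toNat
decreasing_by
  rw [PySem.Int.floordiv_eq_ediv_of_pos (by omega : (0:Int) < 10)]
  omega

def bounce (n : Int) : Bool :=
  bounceLoop (PySem.Int.floordiv n 10) (PySem.Int.mod n 10) false false

-- ===== PORT B =====
def bounce_alt (n : Int) : Bool :=
  if n < 0 then false
  else
    let d := (PySem.Int.toStr n).toList
    decide (d ≠ PySem.List.sorted d (fun x => x) false) &&
      decide (d ≠ PySem.List.sorted d (fun x => x) true)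

-- ===== PRECONDITION & SPEC =====
def Spec_bounce (n : Int) (out : Bool) : Prop := out = bounce_alt n
instance (n : Int) (out : Bool) : Decidable (Spec_bounce n out) := by unfold Spec_bounce; infer_instance

-- ===== CLAIM (what is proved, stated in full; the proofs are below) =====
def Claim_equal_bounce : Prop := ∀ (n : Int), Dom_bounce n → Spec_bounce n (bounce n)

-- ===== LEMMAS AND PROOFS =====

-- LSD-first digit list of a nonnegative Int, as Ints
def pvDigits (n : Int) : List Int := (Nat.digits 10 n.toNat).map (Int.ofNat)

lemma pvDigits_pos (n : Int) (hn : 0 < n) :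
    pvDigits n = PySem.Int.mod n 10 :: pvDigits (PySem.Int.floordiv n 10) := by
  rw [PySem.Int.mod_eq_emod_of_pos (by omega), PySem.Int.floordiv_eq_ediv_of_pos (by omega)]
  unfold pvDigits
  rw [Nat.digits_def' (by omega : 1 < 10) (by omega : 0 < n.toNat),
    (by omega : n.toNat / 10 = (n / 10).toNat), List.map_cons]
  congr 1
  simp only [Int.ofNat_eq_natCast]
  omega

-- A's loop decides "some later (more significant) digit exceeds an earlier one" (and dually)
-- over the list f :: digits(n), modulo the flags already set
lemma bounceLoop_spec (k : Nat) : ∀ (n f : Int) (inc dec : Bool), 0 ≤ n → n.toNat = k →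
    bounceLoop n f inc dec =
      ((inc || !decide (List.IsChain (fun a b => b ≤ a) (f :: pvDigits n))) &&
       (dec || !decide (List.IsChain (fun a b => a ≤ b) (f :: pvDigits n)))) := by
  induction k using Nat.strong_induction_on with
  | _ k ih =>
    intro n f inc dec hn hk
    rw [bounceLoop]
    by_cases h : n > 0
    · simp only [h, dif_pos]
      have hd : pvDigits n = PySem.Int.mod n 10 :: pvDigits (PySem.Int.floordiv n 10) :=
        pvDigits_pos n h
      set d0 := PySem.Int.mod n 10 with hd0
      set n' := PySem.Int.floordiv n 10 with hn'
      have hn'0 : 0 ≤ n' := by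
        rw [hn', PySem.Int.floordiv_eq_ediv_of_pos (by omega)]; omega
      have hlt : n'.toNat < k := by
        rw [hn', PySem.Int.floordiv_eq_ediv_of_pos (by omega)]; omega
    -- unfold the recursive call via the induction hypothesis
      rw [ih n'.toNat hlt n' d0 _ _ hn'0 rfl, hd]
      have eP : decide (List.IsChain (fun a b : Int => b ≤ a) (f :: d0 :: pvDigits n'))
          = (decide (d0 ≤ f) && decide (List.IsChain (fun a b : Int => b ≤ a) (d0 :: pvDigits n'))) := by
        simp [List.isChain_cons_cons]
      have eQ : decide (List.IsChain (fun a b : Int => a ≤ b) (f :: d0 :: pvDigits n'))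
          = (decide (f ≤ d0) && decide (List.IsChain (fun a b : Int => a ≤ b) (d0 :: pvDigits n'))) := by
        simp [List.isChain_cons_cons]
      have e1 : (if d0 > f then true else inc) = (inc || !decide (d0 ≤ f)) := by
        by_cases h' : d0 ≤ f
        · rw [if_neg (by omega)]; simp [h']
        · rw [if_pos (by omega)]; simp [h']
      have e2 : (if d0 < f then true else dec) = (dec || !decide (f ≤ d0)) := by
        by_cases h' : f ≤ d0
        · rw [if_neg (by omega)]; simp [h']
        · rw [if_pos (by omega)]; simp [h']
      rw [eP, eQ, e1, e2]
      clear eP eQ e1 e2 hd hn hk h hn'0 hlt ih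
      generalize decide (d0 ≤ f) = a
      generalize decide (f ≤ d0) = b
      generalize decide (List.IsChain (fun a b : Int => b ≤ a) (d0 :: pvDigits n')) = P
      generalize decide (List.IsChain (fun a b : Int => a ≤ b) (d0 :: pvDigits n')) = Q
      revert a b P Q; revert inc dec; decide
    · simp only [h]
      have h0 : n = 0 := by omega
      subst h0
      have : pvDigits 0 = [] := by unfold pvDigits; simp
      rw [this]
      simp

lemma toDigitsCore_eq (fuel : Nat) : ∀ (m : Nat) (acc : List Char), 0 < m → m < 10 ^ fuel →
    Nat.toDigitsCore 10 fuel m acc = ((Nat.digits 10 m).map Nat.digitChar).reverse ++ acc := by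
  induction fuel with
  | zero => intro m acc hm hlt; simp at hlt; omega
  | succ fuel ih =>
    intro m acc hm hlt
    rw [Nat.toDigitsCore]
    by_cases h : m / 10 = 0
    · simp only [h, if_pos]
      rw [Nat.digits_def' (by omega : 1 < 10) hm, h]
      simp
    · simp only [h]
      rw [ih (m / 10) (Nat.digitChar (m % 10) :: acc) (by omega) (by
        have : m < 10 * 10 ^ fuel := by rw [← pow_succ']; exact hlt
        omega)]
      rw [Nat.digits_def' (by omega : 1 < 10) hm]
      simp

lemma toDigits_eq (m : Nat) (hm : 0 < m) :
    Nat.toDigits 10 m = ((Nat.digits 10 m).map Nat.digitChar).reverse := by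
  have : m < 10 ^ (m + 1) := by
    calc m < 2 ^ m := Nat.lt_two_pow_self
    _ ≤ 10 ^ m := Nat.pow_le_pow_left (by omega) m
    _ ≤ 10 ^ (m + 1) := Nat.pow_le_pow_right (by omega) (by omega)
  simpa [Nat.toDigits] using toDigitsCore_eq (m + 1) m [] hm this

lemma digitChar_le_iff (a b : Nat) (ha : a < 10) (hb : b < 10) :
    (Nat.digitChar a ≤ Nat.digitChar b) ↔ a ≤ b := by
  interval_cases a <;> interval_cases b <;> decide

-- IsChain respects a member-restricted pointwise iff
lemma isChain_congr_mem {α : Type} {R S : α → α → Prop} :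
    ∀ l : List α, (∀ a ∈ l, ∀ b ∈ l, (R a b ↔ S a b)) →
      (List.IsChain R l ↔ List.IsChain S l) := by
  intro l
  induction l with
  | nil => intro _; simp
  | cons a t ih =>
    intro h
    cases t with
    | nil => simp
    | cons b t' =>
      rw [List.isChain_cons_cons, List.isChain_cons_cons,
        h a (by simp) b (by simp),
        ih (fun x hx y hy => h x (by simp [hx]) y (by simp [hy]))]

-- sorted(d) == d  iff  d is a ≤-chain (and the reverse=True twin)
lemma sorted_eq_self_iff (d : List Char) :
    PySem.List.sorted d (fun x => x) false = d ↔ List.IsChain (· ≤ ·) d := by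
  rw [List.isChain_iff_pairwise]
  constructor
  · intro h
    have := PySem.List.sorted_pairwise d (fun x => x)
    rwa [h] at this
  · intro h
    exact PySem.List.sorted_eq_self_of_pairwise d (fun x => x) h

lemma sorted_rev_eq_self_iff (d : List Char) :
    PySem.List.sorted d (fun x => x) true = d ↔ List.IsChain (fun a b => b ≤ a) d := by
  rw [List.isChain_iff_pairwise]
  constructor
  · intro h
    have := PySem.List.sorted_pairwise_rev d (fun x => x)
    rwa [h] at this
  · intro h
    exact PySem.List.sorted_rev_eq_self_of_pairwise d (fun x => x) h

-- the characters of str(n) for n > 0, tied to pvDigits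
lemma toList_toStr_pos (n : Int) (hn : 0 < n) :
    (PySem.Int.toStr n).toList = ((Nat.digits 10 n.toNat).map Nat.digitChar).reverse := by
  rw [PySem.Int.toList_toStr, PySem.Int.toChars, if_neg (by omega), toDigits_eq _ (by omega)]

-- monotone chains on str(n)'s characters are monotone chains on pvDigits, flipped
lemma isChain_chars_iff (n : Int) (hn : 0 < n) (R : Int → Int → Prop) (C : Char → Char → Prop)
    (hRC : ∀ a b : Nat, a < 10 → b < 10 → (C (Nat.digitChar a) (Nat.digitChar b) ↔ R b a)) :
    List.IsChain C ((PySem.Int.toStr n).toList) ↔ List.IsChain R (pvDigits n) := by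
  rw [toList_toStr_pos n hn, List.isChain_reverse, List.isChain_map]
  unfold pvDigits
  rw [List.isChain_map]
  exact isChain_congr_mem _ (fun a ha b hb =>
    hRC b a (Nat.digits_lt_base (by omega) hb) (Nat.digits_lt_base (by omega) ha))

-- ===== VERDICT (by name: the statement is the Claim_ definition above) =====
theorem bounce_spec : Claim_equal_bounce := by
  intro n _
  unfold Spec_bounce
  rcases lt_trichotomy n 0 with hneg | hzero | hpos
  · -- negative: A's loop never runs, B's guard fires
    unfold bounce bounce_alt
    have h' : ¬ PySem.Int.floordiv n 10 > 0 := by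
      rw [PySem.Int.floordiv_eq_ediv_of_pos (by omega)]; omega
    rw [bounceLoop, dif_neg h', if_pos hneg]
    rfl
  · subst hzero
    unfold bounce
    rw [(by decide : PySem.Int.floordiv (0:Int) 10 = 0), (by decide : PySem.Int.mod (0:Int) 10 = 0)]
    rw [bounceLoop, dif_neg (by omega)]
    rw [(by decide : bounce_alt 0 = false)]
    rfl
  · -- positive
    unfold bounce bounce_alt
    rw [bounceLoop_spec (PySem.Int.floordiv n 10).toNat (PySem.Int.floordiv n 10)
      (PySem.Int.mod n 10) false false
      (by rw [PySem.Int.floordiv_eq_ediv_of_pos (by omega)]; omega) rfl]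
    rw [← pvDigits_pos n hpos, if_neg (by omega)]
    have hP : ((PySem.Int.toStr n).toList
        = PySem.List.sorted (PySem.Int.toStr n).toList (fun x => x) false) ↔
        List.IsChain (fun a b : Int => b ≤ a) (pvDigits n) := by
      rw [eq_comm, sorted_eq_self_iff]
      exact isChain_chars_iff n hpos _ _ (fun a b ha hb => by
        rw [digitChar_le_iff a b ha hb]; omega)
    have hQ : ((PySem.Int.toStr n).toList
        = PySem.List.sorted (PySem.Int.toStr n).toList (fun x => x) true) ↔
        List.IsChain (fun a b : Int => a ≤ b) (pvDigits n) := by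
      rw [eq_comm, sorted_rev_eq_self_iff]
      exact isChain_chars_iff n hpos _ _ (fun a b ha hb => by
        rw [digitChar_le_iff b a hb ha]; omega)
    simp only [Bool.false_or, ne_eq]
    rw [decide_not, decide_not]
    congr 1 <;> congr 1
    · exact decide_eq_decide.mpr hP.symm
    · exact decide_eq_decide.mpr hQ.symm
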